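-- pv_equiv track=rewrite | github.com/SQWRKS/Essay-writing-agent | backend/app/agents/writer.py | _extract_subheadings
-- ===== SOURCE A (Python) =====
-- def _extract_subheadings(content: str, limit: int = 2) -> list[dict]:
--     if not content:
--         return []
--     subheadings: list[dict] = []
--     current_title = ""
--     current_lines: list[str] = []
--     for raw_line in content.splitlines():
--         line = raw_line.strip()
--         if line.startswith("## "):
--             if current_title:
--                 subheadings.append({"title": current_title, "content": "\n".join(current_lines).strip()})
--                 if len(subheadings) >= limit:
--                     return subheadings[:limit]
--             current_title = line[3:].strip()
--             current_lines = []
--         elif current_title: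
--             current_lines.append(raw_line)
--
--     if current_title and len(subheadings) < limit:
--         subheadings.append({"title": current_title, "content": "\n".join(current_lines).strip()})
--     return subheadings[:limit]
-- ===== SOURCE B (Python) =====
-- def _extract_subheadings(content: str, limit: int = 2) -> list[dict]:
--     lines = content.splitlines()
--     heads = [(i, ln.strip()) for i, ln in enumerate(lines) if ln.strip().startswith("## ")]
--     out: list[dict] = []
--     for pos, (start, head) in enumerate(heads):
--         title = head[3:].strip()
--         if not title:
--             continue
--         end = heads[pos + 1][0] if pos + 1 < len(heads) else len(lines)
--         out.append({"title": title, "content": "\n".join(lines[start + 1:end]).strip()})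
--         if len(out) >= limit:
--             break
--     return out[:limit]
-- ===== Notes on version B (the rewrite author's own statement) =====
-- stated objective: alternative
-- what changed: Replaces A's single streaming pass with mutable pending-section state (current_title/current_lines) by a two-phase decomposition: first build an index of heading positions from enumerate(splitlines()), then cut each section's body directly as the slice of lines between consecutive heading indices.
import Mathlib
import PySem

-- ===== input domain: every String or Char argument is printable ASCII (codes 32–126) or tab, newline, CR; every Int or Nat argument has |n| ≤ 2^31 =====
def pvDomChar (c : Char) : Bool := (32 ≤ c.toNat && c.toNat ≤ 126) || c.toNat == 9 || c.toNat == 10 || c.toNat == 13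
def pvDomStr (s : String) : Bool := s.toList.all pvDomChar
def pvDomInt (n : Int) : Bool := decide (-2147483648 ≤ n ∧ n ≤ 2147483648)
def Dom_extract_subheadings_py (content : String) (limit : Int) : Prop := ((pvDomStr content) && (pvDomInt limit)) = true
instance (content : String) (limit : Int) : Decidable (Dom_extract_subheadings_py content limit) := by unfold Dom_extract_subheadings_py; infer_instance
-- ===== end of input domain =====

-- B replaces A's streaming pass with pending-section state by a heading-index phase plus direct
-- slicing of each body between consecutive heading positions (objective: alternative decomposition).

-- the dict literal {"title": …, "content": "\n".join(body).strip()} built by both programs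
def pvMkSec (title : String) (body : List String) : List (String × String) :=
  [("title", title), ("content", PySem.Str.strip (PySem.Str.join "\n" body))]

-- ===== PORT A =====
-- A's for-loop over splitlines with state (subheadings, current_title, current_lines);
-- the early `return subheadings[:limit]` is the non-recursive branch.
def pvA_loop (limit : Int) :
    List String → List (List (String × String)) → String → List String → List (List (String × String))
  | [], subs, title, cur =>
      let subs := if title ≠ "" ∧ (subs.length : Int) < limit then subs ++ [pvMkSec title cur] else subs
      PySem.List.slice subs none (some limit)
  | raw :: rest, subs, title, cur =>
      let line := PySem.Str.strip raw
      if PySem.Str.startswith line "## " then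
        if title ≠ "" then
          let subs' := subs ++ [pvMkSec title cur]
          if limit ≤ (subs'.length : Int) then PySem.List.slice subs' none (some limit)
          else pvA_loop limit rest subs' (PySem.Str.strip (PySem.Str.slice line (some 3) none)) []
        else pvA_loop limit rest subs (PySem.Str.strip (PySem.Str.slice line (some 3) none)) []
      else if title ≠ "" then pvA_loop limit rest subs title (cur ++ [raw])
      else pvA_loop limit rest subs title cur

def extract_subheadings_py (content : String) (limit : Int) : List (List (String × String)) :=
  if content = "" then []
  else pvA_loop limit (PySem.Str.splitlines content) [] "" []

-- ===== PORT B =====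
-- B's for-loop over the heading index `heads`; `heads[pos+1][0] if pos+1 < len(heads) else len(lines)`
-- is read off the tail of the list being recursed over; `break` is the non-recursive branch.
def pvB_loop (lines : List String) (limit : Int) :
    List (Int × String) → List (List (String × String)) → List (List (String × String))
  | [], out => out
  | (start, head) :: rest, out =>
      let title := PySem.Str.strip (PySem.Str.slice head (some 3) none)
      if title = "" then pvB_loop lines limit rest out
      else
        let endIdx : Int := match rest with
          | [] => PySem.List.len lines
          | (e, _) :: _ => e
        let out' := out ++ [pvMkSec title (PySem.List.slice lines (some (start + 1)) (some endIdx))]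
        if limit ≤ (out'.length : Int) then out' else pvB_loop lines limit rest out'

def extract_subheadings_py_alt (content : String) (limit : Int) : List (List (String × String)) :=
  let lines := PySem.Str.splitlines content
  let heads := ((PySem.List.enumerate lines 0).filter
      (fun p => PySem.Str.startswith (PySem.Str.strip p.2) "## ")).map
      (fun p => (p.1, PySem.Str.strip p.2))
  PySem.List.slice (pvB_loop lines limit heads []) none (some limit)

-- ===== PRECONDITION & SPEC =====
def Spec_extract_subheadings_py (content : String) (limit : Int) (out : List (List (String × String))) : Prop := out = extract_subheadings_py_alt content limit
instance (content : String) (limit : Int) (out : List (List (String × String))) : Decidable (Spec_extract_subheadings_py content limit out) := by unfold Spec_extract_subheadings_py; infer_instance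

-- ===== CLAIM (what is proved, stated in full; the proofs are below) =====
def Claim_equal_extract_subheadings_py : Prop := ∀ (content : String) (limit : Int), Dom_extract_subheadings_py content limit → Spec_extract_subheadings_py content limit (extract_subheadings_py content limit)

-- ===== LEMMAS AND PROOFS =====

def pvIsHead (raw : String) : Bool := PySem.Str.startswith (PySem.Str.strip raw) "## "
def pvTitleOf (raw : String) : String :=
  PySem.Str.strip (PySem.Str.slice (PySem.Str.strip raw) (some 3) none)

theorem pvIsHead_def (raw : String) :
    PySem.Str.startswith (PySem.Str.strip raw) "## " = pvIsHead raw := rfl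
theorem pvTitleOf_def (raw : String) :
    PySem.Str.strip (PySem.Str.slice (PySem.Str.strip raw) (some 3) none) = pvTitleOf raw := rfl

-- common reference recursion both loops are reduced to
def pvSpec (limit : Int) : List String → List (List (String × String)) → List (List (String × String))
  | [], out => out
  | l :: rest, out =>
    if pvIsHead l then
      if pvTitleOf l = "" then pvSpec limit rest out
      else
        let out' := out ++ [pvMkSec (pvTitleOf l) (rest.takeWhile (fun x => !pvIsHead x))]
        if limit ≤ (out'.length : Int) then out' else pvSpec limit rest out'
    else pvSpec limit rest out

-- B's heading index, as a structural recursion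
def pvHeads : List String → List (Int × String)
  | [] => []
  | l :: rest =>
      if pvIsHead l then (0, PySem.Str.strip l) :: (pvHeads rest).map (fun p => (p.1 + 1, p.2))
      else (pvHeads rest).map (fun p => (p.1 + 1, p.2))

theorem pv_slice_nil {α : Type} (limit : Int) :
    PySem.List.slice ([] : List α) none (some limit) = [] := by
  by_cases h0 : 0 ≤ limit
  · rw [PySem.List.slice_to _ h0]; simp
  · obtain ⟨k, hk⟩ := Int.exists_eq_neg_ofNat (by omega : limit ≤ 0)
    rw [hk, PySem.List.slice_to_neg_natCast _ k (by omega)]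
    simp

theorem pv_slice_small {α : Type} (l : List α) (limit : Int) (hl : l.length ≤ 1) (hlim : limit ≤ 0) :
    PySem.List.slice l none (some limit) = [] := by
  by_cases h0 : 0 ≤ limit
  · have hz : limit = 0 := le_antisymm hlim h0
    subst hz
    rw [PySem.List.slice_to _ le_rfl]
    simp
  · obtain ⟨k, hk⟩ := Int.exists_eq_neg_ofNat (by omega : limit ≤ 0)
    rw [hk, PySem.List.slice_to_neg_natCast _ k (by omega)]
    have hz : l.length - k = 0 := by omega
    rw [hz]
    simp

theorem pv_slice_cons_shift {α : Type} (x : α) (l : List α) (a b : Int) (ha : 0 ≤ a) (hb : 0 ≤ b) :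
    PySem.List.slice (x :: l) (some (a + 1)) (some (b + 1)) = PySem.List.slice l (some a) (some b) := by
  rw [PySem.List.slice_toNat _ (by omega) (by omega), PySem.List.slice_toNat _ ha hb]
  have h1 : (a + 1).toNat = a.toNat + 1 := by omega
  have h2 : (b + 1).toNat = b.toNat + 1 := by omega
  rw [h1, h2]
  simp

theorem pv_enumerate_shift {α : Type} (xs : List α) (s : Int) :
    PySem.List.enumerate xs (s + 1) = (PySem.List.enumerate xs s).map (fun p => (p.1 + 1, p.2)) := by
  induction xs generalizing s with
  | nil => simp [PySem.List.enumerate_nil]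
  | cons x xs ih =>
    rw [PySem.List.enumerate_cons, PySem.List.enumerate_cons]
    simp [ih (s + 1)]

theorem pv_heads_eq (lines : List String) :
    ((PySem.List.enumerate lines 0).filter
      (fun p => PySem.Str.startswith (PySem.Str.strip p.2) "## ")).map
      (fun p => (p.1, PySem.Str.strip p.2)) = pvHeads lines := by
  induction lines with
  | nil => simp [PySem.List.enumerate_nil, pvHeads]
  | cons l rest ih =>
    rw [PySem.List.enumerate_cons]
    have hsh : PySem.List.enumerate rest (0 + 1) =
        (PySem.List.enumerate rest 0).map (fun p => (p.1 + 1, p.2)) := pv_enumerate_shift rest 0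
    rw [hsh]
    simp only [List.filter_cons, pvHeads, pvIsHead]
    by_cases hl : PySem.Str.startswith (PySem.Str.strip l) "## " = true
    · simp only [hl, if_pos]
      simp only [List.map_cons]
      refine congrArg₂ _ rfl ?_
      rw [← ih]
      simp [Function.comp_def, List.filter_map, List.map_map]
    · simp only [hl]
      simp only [Bool.false_eq_true, if_false]
      rw [← ih]
      simp [Function.comp_def, List.filter_map, List.map_map]

theorem pv_heads_nonneg (lines : List String) : ∀ p ∈ pvHeads lines, 0 ≤ p.1 := by
  induction lines with
  | nil => simp [pvHeads]
  | cons l rest ih =>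
    intro p hp
    simp only [pvHeads] at hp
    have hmap : ∀ q ∈ (pvHeads rest).map (fun p => (p.1 + 1, p.2)), 0 ≤ q.1 := by
      intro q hq
      obtain ⟨r, hr, rfl⟩ := List.mem_map.mp hq
      have := ih r hr
      simp only []
      omega
    split at hp
    · rcases List.mem_cons.mp hp with rfl | h
      · simp
      · exact hmap _ h
    · exact hmap _ hp

theorem pv_heads_nil_iff (lines : List String) :
    pvHeads lines = [] → lines.takeWhile (fun x => !pvIsHead x) = lines := by
  induction lines with
  | nil => intro _; rfl
  | cons l rest ih =>
    intro h
    simp only [pvHeads] at h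
    split at h
    · exact absurd h (by simp)
    · rename_i hl
      have hr : pvHeads rest = [] := by simpa using h
      rw [List.takeWhile_cons_of_pos (by simp [hl]), ih hr]

theorem pv_heads_cons_take (lines : List String) (e : Int) (h : String) (tl : List (Int × String))
    (hh : pvHeads lines = (e, h) :: tl) :
    0 ≤ e ∧ lines.take e.toNat = lines.takeWhile (fun x => !pvIsHead x) := by
  induction lines generalizing e h tl with
  | nil => simp [pvHeads] at hh
  | cons l rest ih =>
    simp only [pvHeads] at hh
    split at hh
    · rename_i hl
      injection hh with h1 _
      injection h1 with he _
      subst he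
      refine ⟨le_refl 0, ?_⟩
      rw [List.takeWhile_cons_of_neg (by simp [hl])]
      simp
    · rename_i hl
      cases hr : pvHeads rest with
      | nil => rw [hr] at hh; simp at hh
      | cons q tl' =>
        rw [hr] at hh
        obtain ⟨e', h'⟩ := q
        simp only [List.map_cons, List.cons.injEq, Prod.mk.injEq] at hh
        obtain ⟨⟨he, hh'⟩, htl⟩ := hh
        obtain ⟨he', hta⟩ := ih e' h' tl' hr
        constructor
        · omega
        · rw [List.takeWhile_cons_of_pos (by simp [hl])]
          have hne : e.toNat = e'.toNat + 1 := by omega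
          rw [hne, List.take_succ_cons, hta]

theorem pvB_loop_cons_eq (lines : List String) (limit : Int) (s : Int) (hd : String)
    (rest : List (Int × String)) (out : List (List (String × String))) :
    pvB_loop lines limit ((s, hd) :: rest) out =
      if PySem.Str.strip (PySem.Str.slice hd (some 3) none) = "" then pvB_loop lines limit rest out
      else
        let endIdx : Int := match rest with
          | [] => PySem.List.len lines
          | (e, _) :: _ => e
        let out' := out ++ [pvMkSec (PySem.Str.strip (PySem.Str.slice hd (some 3) none))
          (PySem.List.slice lines (some (s + 1)) (some endIdx))]
        if limit ≤ (out'.length : Int) then out' else pvB_loop lines limit rest out' := by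
  simp only [pvB_loop]

theorem pvB_shift (x : String) (lines : List String) (limit : Int) (hs : List (Int × String))
    (hnn : ∀ p ∈ hs, 0 ≤ p.1) (out : List (List (String × String))) :
    pvB_loop (x :: lines) limit (hs.map (fun p => (p.1 + 1, p.2))) out = pvB_loop lines limit hs out := by
  induction hs generalizing out with
  | nil => rfl
  | cons p rest ih =>
    obtain ⟨s, hd⟩ := p
    have hs0 : 0 ≤ s := hnn (s, hd) (by simp)
    have hnn' : ∀ p ∈ rest, 0 ≤ p.1 := fun p hp => hnn p (by simp [hp])
    cases rest with
    | nil =>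
      simp only [List.map_cons, List.map_nil, pvB_loop, PySem.List.len_eq, List.length_cons]
      by_cases ht : PySem.Str.strip (PySem.Str.slice hd (some 3) none) = ""
      · rw [if_pos ht, if_pos ht]
      · rw [if_neg ht, if_neg ht]
        have hcast : ((lines.length + 1 : Nat) : Int) = (lines.length : Int) + 1 := by
          push_cast; ring
        rw [hcast, pv_slice_cons_shift x lines (s + 1) (lines.length : Int) (by omega) (by omega)]
    | cons q tl =>
      obtain ⟨e, hd2⟩ := q
      have he : 0 ≤ e := hnn' (e, hd2) (by simp)
      simp only [List.map_cons]
      conv_lhs => rw [pvB_loop_cons_eq]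
      conv_rhs => rw [pvB_loop_cons_eq]
      dsimp only
      by_cases ht : PySem.Str.strip (PySem.Str.slice hd (some 3) none) = ""
      · rw [if_pos ht, if_pos ht]
        exact ih hnn' out
      · rw [if_neg ht, if_neg ht]
        rw [pv_slice_cons_shift x lines (s + 1) e (by omega) he]
        split
        · rfl
        · exact ih hnn' _

theorem pvSpec_dropWhile (limit : Int) (lines : List String) (out : List (List (String × String))) :
    pvSpec limit lines out = pvSpec limit (lines.dropWhile (fun x => !pvIsHead x)) out := by
  induction lines with
  | nil => rfl
  | cons l rest ih =>
    by_cases hl : pvIsHead l = true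
    · rw [List.dropWhile_cons_of_neg (by simp [hl])]
    · have hspec : pvSpec limit (l :: rest) out = pvSpec limit rest out := by
        simp only [pvSpec]
        rw [if_neg (by simp [hl])]
      rw [hspec, List.dropWhile_cons_of_pos (by simp [hl]), ih]

theorem pvB_eq_spec (limit : Int) (lines : List String) :
    ∀ out, pvB_loop lines limit (pvHeads lines) out = pvSpec limit lines out := by
  induction lines with
  | nil => intro out; rfl
  | cons l rest ih =>
    intro out
    by_cases hl : pvIsHead l = true
    · have hpv : pvHeads (l :: rest) =
          (0, PySem.Str.strip l) :: (pvHeads rest).map (fun p => (p.1 + 1, p.2)) := by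
        simp only [pvHeads]
        rw [if_pos hl]
      have hspec : pvSpec limit (l :: rest) out =
          if pvTitleOf l = "" then pvSpec limit rest out
          else
            if limit ≤ ((out ++ [pvMkSec (pvTitleOf l) (rest.takeWhile (fun x => !pvIsHead x))]).length : Int)
            then out ++ [pvMkSec (pvTitleOf l) (rest.takeWhile (fun x => !pvIsHead x))]
            else pvSpec limit rest (out ++ [pvMkSec (pvTitleOf l) (rest.takeWhile (fun x => !pvIsHead x))]) := by
        simp only [pvSpec]
        rw [if_pos hl]
      rw [hpv, hspec]
      simp only [pvB_loop, pvTitleOf_def]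
      by_cases ht : pvTitleOf l = ""
      · rw [if_pos ht, if_pos ht]
        rw [pvB_shift l rest limit (pvHeads rest) (pv_heads_nonneg rest) out]
        exact ih out
      · rw [if_neg ht, if_neg ht]
        have hbody : PySem.List.slice (l :: rest) (some (0 + 1))
              (some (match (pvHeads rest).map (fun p => (p.1 + 1, p.2)) with
                | [] => PySem.List.len (l :: rest)
                | (e, _) :: _ => e)) =
            rest.takeWhile (fun x => !pvIsHead x) := by
          cases hr : pvHeads rest with
          | nil =>
            simp only [List.map_nil]
            rw [PySem.List.len_eq]
            have h1 : ((l :: rest).length : Int) = (rest.length : Int) + 1 := by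
              simp
            rw [h1, show (0 : Int) + 1 = 0 + 1 from rfl,
              pv_slice_cons_shift l rest 0 (rest.length : Int) (by omega) (by omega)]
            rw [PySem.List.slice_zero_start, PySem.List.slice_to _ (by omega)]
            rw [pv_heads_nil_iff rest hr]
            simp
          | cons q tl =>
            obtain ⟨e, hh⟩ := q
            obtain ⟨he, hta⟩ := pv_heads_cons_take rest e hh tl hr
            simp only [List.map_cons]
            rw [pv_slice_cons_shift l rest 0 e (by omega) he]
            rw [PySem.List.slice_zero_start, PySem.List.slice_to _ he]
            exact hta
        rw [hbody]
        split
        · rfl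
        · rw [pvB_shift l rest limit (pvHeads rest) (pv_heads_nonneg rest) _]
          exact ih _
    · have hpv : pvHeads (l :: rest) = (pvHeads rest).map (fun p => (p.1 + 1, p.2)) := by
        simp only [pvHeads]
        rw [if_neg (by simp [hl])]
      have hspec : pvSpec limit (l :: rest) out = pvSpec limit rest out := by
        simp only [pvSpec]
        rw [if_neg (by simp [hl])]
      rw [hpv, hspec, pvB_shift l rest limit (pvHeads rest) (pv_heads_nonneg rest) out]
      exact ih out

theorem pvA_nonpos (limit : Int) (hlim : limit ≤ 0) (lines : List String) :
    ∀ title cur, pvA_loop limit lines [] title cur = [] := by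
  induction lines with
  | nil =>
    intro title cur
    simp only [pvA_loop]
    rw [if_neg (by rintro ⟨-, h⟩; simp at h; omega)]
    exact pv_slice_nil limit
  | cons raw rest ih =>
    intro title cur
    simp only [pvA_loop]
    by_cases hh : PySem.Str.startswith (PySem.Str.strip raw) "## " = true
    · rw [if_pos hh]
      by_cases htt : title ≠ ""
      · rw [if_pos htt, if_pos (by simp; omega)]
        exact pv_slice_small _ limit (by simp) hlim
      · rw [if_neg htt]
        exact ih _ _
    · rw [if_neg hh]
      by_cases htt : title ≠ ""
      · rw [if_pos htt]
        exact ih _ _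
      · rw [if_neg htt]
        exact ih _ _

theorem pvB_nonpos (limit : Int) (hlim : limit ≤ 0) (lines : List String) (hs : List (Int × String)) :
    PySem.List.slice (pvB_loop lines limit hs []) none (some limit) = [] := by
  induction hs with
  | nil => exact pv_slice_nil limit
  | cons p rest ih =>
    obtain ⟨s, hd⟩ := p
    simp only [pvB_loop]
    by_cases ht : PySem.Str.strip (PySem.Str.slice hd (some 3) none) = ""
    · rw [if_pos ht]
      exact ih
    · rw [if_neg ht, if_pos (by simp; omega)]
      exact pv_slice_small _ limit (by simp) hlim

theorem pv_head_glue (limit : Int) (l : String) (rest : List String)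
    (subs : List (List (String × String))) (hl : pvIsHead l = true) :
    (if pvTitleOf l = "" then PySem.List.slice (pvSpec limit rest subs) none (some limit)
     else
       if limit ≤ ((subs ++ [pvMkSec (pvTitleOf l) (rest.takeWhile (fun x => !pvIsHead x))]).length : Int)
       then PySem.List.slice (subs ++ [pvMkSec (pvTitleOf l) (rest.takeWhile (fun x => !pvIsHead x))]) none (some limit)
       else PySem.List.slice (pvSpec limit (rest.dropWhile (fun x => !pvIsHead x))
            (subs ++ [pvMkSec (pvTitleOf l) (rest.takeWhile (fun x => !pvIsHead x))])) none (some limit))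
    = PySem.List.slice (pvSpec limit (l :: rest) subs) none (some limit) := by
  have hspec : pvSpec limit (l :: rest) subs =
      if pvTitleOf l = "" then pvSpec limit rest subs
      else
        if limit ≤ ((subs ++ [pvMkSec (pvTitleOf l) (rest.takeWhile (fun x => !pvIsHead x))]).length : Int)
        then subs ++ [pvMkSec (pvTitleOf l) (rest.takeWhile (fun x => !pvIsHead x))]
        else pvSpec limit rest (subs ++ [pvMkSec (pvTitleOf l) (rest.takeWhile (fun x => !pvIsHead x))]) := by
    simp only [pvSpec]
    rw [if_pos hl]
  rw [hspec]
  by_cases ht : pvTitleOf l = ""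
  · rw [if_pos ht, if_pos ht]
  · rw [if_neg ht, if_neg ht]
    split
    · rfl
    · rw [← pvSpec_dropWhile]

theorem pvA_eq_spec (limit : Int) (lines : List String) :
    ∀ (subs : List (List (String × String))) (title : String) (cur : List String),
    (subs.length : Int) < limit →
    pvA_loop limit lines subs title cur =
      if title = "" then PySem.List.slice (pvSpec limit lines subs) none (some limit)
      else
        if limit ≤ ((subs ++ [pvMkSec title (cur ++ lines.takeWhile (fun x => !pvIsHead x))]).length : Int)
        then PySem.List.slice (subs ++ [pvMkSec title (cur ++ lines.takeWhile (fun x => !pvIsHead x))]) none (some limit)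
        else PySem.List.slice (pvSpec limit (lines.dropWhile (fun x => !pvIsHead x))
             (subs ++ [pvMkSec title (cur ++ lines.takeWhile (fun x => !pvIsHead x))])) none (some limit) := by
  induction lines with
  | nil =>
    intro subs title cur hlen
    simp only [pvA_loop, List.takeWhile_nil, List.dropWhile_nil, List.append_nil]
    by_cases ht : title = ""
    · rw [if_pos ht, if_neg (by rintro ⟨h, -⟩; exact h ht)]
      have : pvSpec limit [] subs = subs := rfl
      rw [this]
    · rw [if_neg ht, if_pos ⟨ht, hlen⟩]
      have : pvSpec limit [] (subs ++ [pvMkSec title cur]) = subs ++ [pvMkSec title cur] := rfl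
      rw [this]
      split <;> rfl
  | cons l rest ih =>
    intro subs title cur hlen
    simp only [pvA_loop, pvIsHead_def, pvTitleOf_def]
    by_cases hl : pvIsHead l = true
    · rw [if_pos hl]
      by_cases ht : title = ""
      · rw [if_neg (by simpa using ht), if_pos ht]
        rw [ih subs (pvTitleOf l) [] hlen]
        simp only [List.nil_append]
        exact pv_head_glue limit l rest subs hl
      · rw [if_pos ht, if_neg ht]
        rw [List.takeWhile_cons_of_neg (by simp [hl]), List.dropWhile_cons_of_neg (by simp [hl])]
        simp only [List.append_nil]
        split
        · rfl
        · rename_i hlt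
          rw [ih (subs ++ [pvMkSec title cur]) (pvTitleOf l) []
            (by simp only [List.length_append, List.length_cons, List.length_nil] at hlt ⊢; push_cast at hlt ⊢; omega)]
          simp only [List.nil_append]
          exact pv_head_glue limit l rest (subs ++ [pvMkSec title cur]) hl
    · rw [if_neg hl]
      have hspec : pvSpec limit (l :: rest) subs = pvSpec limit rest subs := by
        simp only [pvSpec]
        rw [if_neg (by simp [hl])]
      by_cases ht : title = ""
      · rw [if_neg (by simpa using ht), if_pos ht]
        rw [ih subs title cur hlen, if_pos ht, hspec]
      · rw [if_pos (by simpa using ht), if_neg ht]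
        rw [ih subs title (cur ++ [l]) hlen, if_neg ht]
        rw [List.takeWhile_cons_of_pos (by simp [hl]), List.dropWhile_cons_of_pos (by simp [hl])]
        simp only [List.append_assoc, List.cons_append, List.nil_append]

-- ===== VERDICT (by name: the statement is the Claim_ definition above) =====
theorem extract_subheadings_py_spec : Claim_equal_extract_subheadings_py := by
  intro content limit _
  unfold Spec_extract_subheadings_py extract_subheadings_py
  simp only [extract_subheadings_py_alt, pv_heads_eq]
  by_cases hc : content = ""
  · rw [if_pos hc, hc]
    have hsp : PySem.Str.splitlines "" = [] := by decide
    rw [hsp]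
    have h0 : pvB_loop ([] : List String) limit (pvHeads []) [] = [] := rfl
    rw [h0, pv_slice_nil]
  · rw [if_neg hc]
    by_cases hpos : 0 < limit
    · rw [pvB_eq_spec limit (PySem.Str.splitlines content) []]
      rw [pvA_eq_spec limit (PySem.Str.splitlines content) [] "" []
        (by simp only [List.length_nil]; omega)]
      rw [if_pos rfl]
    · rw [pvA_nonpos limit (by omega) (PySem.Str.splitlines content) "" [],
        pvB_nonpos limit (by omega) (PySem.Str.splitlines content) (pvHeads (PySem.Str.splitlines content))]
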